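-- pv_equiv track=rewrite | github.com/arosini/advent-of-code-python | 2015/Day09.py | find_longest_distance
-- ===== SOURCE A (Python) =====
-- def find_longest_distance(route, remaining_cities, destinations):
--     if len(remaining_cities) == 0:
--         return 0
--
--     current_city = None if len(route) == 0 else route[-1]
--     longest_distance = 0
--
--     for next_city in remaining_cities:
--         if current_city is None: distance_to_next_city = 0
--         else: distance_to_next_city = destinations.get(current_city, {}).get(next_city, None)
--
--         if distance_to_next_city is None: continue
--
--         next_route = route + [next_city]
--         next_remaining_cities = remaining_cities.copy()
--         next_remaining_cities.remove(next_city)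
--
--         distance = distance_to_next_city + find_longest_distance(next_route, next_remaining_cities, destinations)
--
--         if distance > longest_distance:
--             longest_distance = distance
--
--     return longest_distance
-- ===== SOURCE B (Python) =====
-- def find_longest_distance(route, remaining_cities, destinations):
--     memo = {}
--
--     def go(current, remaining):
--         if not remaining:
--             return 0
--         key = (current, remaining)
--         if key in memo:
--             return memo[key]
--         best = 0
--         for next_city in remaining:
--             if current is None:
--                 d = 0
--             else:
--                 d = destinations.get(current, {}).get(next_city)
--                 if d is None:
--                     continue
--             rest = list(remaining)
--             rest.remove(next_city)
--             total = d + go(next_city, tuple(rest))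
--             if total > best:
--                 best = total
--         memo[key] = best
--         return best
--
--     current = route[-1] if route else None
--     return go(current, tuple(remaining_cities))
-- ===== Notes on version B (the rewrite author's own statement) =====
-- stated objective: alternative
-- what changed: A explores all orderings of the remaining cities by plain recursion on (route, remaining); B runs the same search memoised on (current city, remaining list) -- every reachable state is a subsequence of the original list, so each subproblem is solved once (asymptotically fewer states on dense distance tables, though a timing run's random sparse inputs showed no measured speedup).
import Mathlib
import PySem

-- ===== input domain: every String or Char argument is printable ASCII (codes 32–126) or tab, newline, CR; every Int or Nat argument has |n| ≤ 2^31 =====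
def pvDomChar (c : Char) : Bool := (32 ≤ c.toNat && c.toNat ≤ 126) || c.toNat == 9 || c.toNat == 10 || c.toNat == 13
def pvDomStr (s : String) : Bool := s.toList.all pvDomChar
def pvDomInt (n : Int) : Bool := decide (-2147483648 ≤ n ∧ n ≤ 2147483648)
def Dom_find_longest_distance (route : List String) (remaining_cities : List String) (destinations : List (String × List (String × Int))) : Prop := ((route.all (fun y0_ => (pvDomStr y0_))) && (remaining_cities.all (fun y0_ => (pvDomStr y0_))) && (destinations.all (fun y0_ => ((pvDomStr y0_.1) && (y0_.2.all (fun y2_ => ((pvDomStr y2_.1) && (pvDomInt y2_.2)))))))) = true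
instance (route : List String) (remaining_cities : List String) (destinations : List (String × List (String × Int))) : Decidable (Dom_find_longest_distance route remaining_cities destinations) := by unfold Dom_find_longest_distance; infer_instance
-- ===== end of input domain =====

-- B replaces A's plain recursion over (route, remaining) by the same search memoised on
-- (current city, remaining list), solving each subproblem once (objective: alternative).

-- edge lookup `destinations.get(current_city, {}).get(next_city)` — this expression occurs in both Pythons
def pvEdge (destinations : List (String × List (String × Int))) (c next_city : String) : Option Int :=
  (PySem.Dict.mk (((PySem.Dict.mk destinations).get? c).getD [])).get? next_city

-- ===== PORT A =====
-- the body of A's `for next_city in remaining_cities` loop, extracted as a helper; `rec` is the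
-- recursive call. `remaining_cities.copy(); .remove(next_city)` removes the first occurrence
-- = List.erase (exact since next_city ∈ remaining_cities, PySem.List.remove?_eq_some_erase)
def pvStepA (destinations : List (String × List (String × Int))) (current_city : Option String) (route remaining_cities : List String) (rec : List String → List String → Int) (longest_distance : Int) (next_city : String) : Int :=
  let d? : Option Int :=
    match current_city with
    | none => some 0
    | some c => pvEdge destinations c next_city
  match d? with
  | none => longest_distance
  | some d =>
    let distance := d + rec (route ++ [next_city]) (remaining_cities.erase next_city)
    if longest_distance < distance then distance else longest_distance

-- A's recursion, totalised by a structural fuel (= remaining_cities.length at entry; each recursive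
-- call removes one city, so the 'fuel = 0' branch is only ever reached with remaining = []);
-- the for-loop with accumulator `longest_distance` is the foldl
def pvFindA (fuel : Nat) (route : List String) (remaining_cities : List String) (destinations : List (String × List (String × Int))) : Int :=
  match fuel with
  | 0 => 0
  | fuel + 1 =>
    if remaining_cities = [] then 0
    else
      let current_city : Option String :=
        if route = [] then none else PySem.List.pyGet? route (-1)
      remaining_cities.foldl
        (pvStepA destinations current_city route remaining_cities
          (fun r' rem' => pvFindA fuel r' rem' destinations)) 0

def find_longest_distance (route : List String) (remaining_cities : List String) (destinations : List (String × List (String × Int))) : Int :=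
  pvFindA remaining_cities.length route remaining_cities destinations

-- ===== PORT B =====
-- the memo dict of Source B, keyed by (current, tuple(remaining))
abbrev pvMemo := PySem.Dict (Option String × List String) Int

-- the body of Source B's `for next_city in remaining` loop; the accumulator threads (best, memo)
def pvStepB (destinations : List (String × List (String × Int))) (current : Option String) (remaining : List String) (rec : Option String → List String → pvMemo → Int × pvMemo) (acc : Int × pvMemo) (next_city : String) : Int × pvMemo :=
  let d? : Option Int :=
    match current with
    | none => some 0
    | some c => pvEdge destinations c next_city
  match d? with
  | none => acc
  | some d =>
    let s := rec (some next_city) (remaining.erase next_city) acc.2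
    let total := d + s.1
    (if acc.1 < total then total else acc.1, s.2)

-- Source B's `go`, totalised by the same structural fuel
def pvGoB (fuel : Nat) (destinations : List (String × List (String × Int))) (current : Option String) (remaining : List String) (memo : pvMemo) : Int × pvMemo :=
  match fuel with
  | 0 => (0, memo)
  | fuel + 1 =>
    if remaining = [] then (0, memo)
    else
      match memo.get? (current, remaining) with
      | some v => (v, memo)
      | none =>
        let r := remaining.foldl
          (pvStepB destinations current remaining
            (fun c' rem' m' => pvGoB fuel destinations c' rem' m')) (0, memo)
        (r.1, r.2.insert (current, remaining) r.1)

def find_longest_distance_alt (route : List String) (remaining_cities : List String) (destinations : List (String × List (String × Int))) : Int :=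
  let current : Option String :=
    if route = [] then none else PySem.List.pyGet? route (-1)
  (pvGoB remaining_cities.length destinations current remaining_cities PySem.Dict.empty).1

-- ===== PRECONDITION & SPEC =====
def Spec_find_longest_distance (route : List String) (remaining_cities : List String) (destinations : List (String × List (String × Int))) (out : Int) : Prop := out = find_longest_distance_alt route remaining_cities destinations
instance (route : List String) (remaining_cities : List String) (destinations : List (String × List (String × Int))) (out : Int) : Decidable (Spec_find_longest_distance route remaining_cities destinations out) := by unfold Spec_find_longest_distance; infer_instance

-- ===== CLAIM (what is proved, stated in full; the proofs are below) =====
def Claim_equal_find_longest_distance : Prop := ∀ (route : List String) (remaining_cities : List String) (destinations : List (String × List (String × Int))), Dom_find_longest_distance route remaining_cities destinations → Spec_find_longest_distance route remaining_cities destinations (find_longest_distance route remaining_cities destinations)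

-- ===== LEMMAS AND PROOFS =====

-- A's value as a function of the current city alone (route enters only through its last element)
def pvVal (destinations : List (String × List (String × Int))) (cur : Option String) (rem : List String) : Int :=
  pvFindA rem.length (match cur with | none => [] | some c => [c]) rem destinations

-- every memo entry stores the correct value
def pvInv (destinations : List (String × List (String × Int))) (memo : pvMemo) : Prop :=
  ∀ cur rem v, memo.get? (cur, rem) = some v → v = pvVal destinations cur rem

lemma pvCurOf (route : List String) :
    (if route = [] then none else PySem.List.pyGet? route (-1)) = route.getLast? := by
  cases route with
  | nil => simp
  | cons x xs => simp [PySem.List.pyGet?_neg_one]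

lemma pvEraseLen {rem : List String} {x : String} (h : x ∈ rem) :
    (rem.erase x).length + 1 = rem.length := by
  rw [List.length_erase_of_mem h]
  have := List.length_pos_of_mem h
  omega

-- a (best, memo) fold agrees componentwise with a best-only fold when the steps agree
lemma pvFoldPair (todo rem : List String) (fB : Int × pvMemo → String → Int × pvMemo)
    (fA : Int → String → Int) (Inv : pvMemo → Prop)
    (hsub : ∀ x ∈ todo, x ∈ rem)
    (hstep : ∀ b m x, Inv m → x ∈ rem → (fB (b, m) x).1 = fA b x ∧ Inv (fB (b, m) x).2) :
    ∀ b m, Inv m → (todo.foldl fB (b, m)).1 = todo.foldl fA b ∧ Inv (todo.foldl fB (b, m)).2 := by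
  induction todo with
  | nil => intro b m hm; exact ⟨rfl, hm⟩
  | cons x tl ih =>
    intro b m hm
    have hx : x ∈ rem := hsub x (List.mem_cons_self ..)
    have htl : ∀ y ∈ tl, y ∈ rem := fun y hy => hsub y (List.mem_cons_of_mem _ hy)
    have hs := hstep b m x hm hx
    simp only [List.foldl_cons]
    have hpair : fB (b, m) x = ((fB (b, m) x).1, (fB (b, m) x).2) := rfl
    rw [hpair, hs.1]
    exact ih htl _ _ hs.2

lemma pvA_main (dest : List (String × List (String × Int))) :
    ∀ fuel rem, rem.length ≤ fuel → ∀ route : List String,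
      pvFindA fuel route rem dest = pvVal dest route.getLast? rem := by
  intro fuel
  induction fuel using Nat.strong_induction_on with
  | _ fuel ih =>
    intro rem hlen route
    match fuel with
    | 0 =>
      have hr : rem = [] := List.eq_nil_of_length_eq_zero (Nat.le_zero.mp hlen)
      subst hr
      simp [pvFindA, pvVal]
    | n + 1 =>
      by_cases hr : rem = []
      · subst hr; simp [pvFindA, pvVal]
      · obtain ⟨k, hk⟩ : ∃ k, rem.length = k + 1 := by
          have : rem.length ≠ 0 := fun h => hr (List.eq_nil_of_length_eq_zero h)
          exact ⟨rem.length - 1, by omega⟩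
        obtain ⟨r0, hr0⟩ : ∃ r0 : List String,
            (if r0 = [] then none else PySem.List.pyGet? r0 (-1)) = route.getLast? ∧
            pvVal dest route.getLast? rem = pvFindA rem.length r0 rem dest := by
          cases hc : route.getLast? with
          | none => exact ⟨[], by simp, by rw [pvVal]⟩
          | some c => exact ⟨[c], by simp [PySem.List.pyGet?_neg_one], by rw [pvVal]⟩
        rw [hr0.2, hk, pvFindA, pvFindA]
        simp only [hr, if_false, pvCurOf route, hr0.1]
        apply PySem.List.foldl_congr_mem
        intro acc x hx
        have hel : (rem.erase x).length ≤ n := by have := pvEraseLen hx; omega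
        have hel' : (rem.erase x).length ≤ k := by have := pvEraseLen hx; omega
        simp only [pvStepA]
        cases route.getLast? with
        | none =>
          simp only [ih n (Nat.lt_succ_self n) _ hel, ih k (by omega) _ hel',
            List.getLast?_concat]
        | some c =>
          rcases hpe : pvEdge dest c x with _ | d <;>
            simp only [hpe, ih n (Nat.lt_succ_self n) _ hel, ih k (by omega) _ hel',
              List.getLast?_concat]

lemma pvB_main (dest : List (String × List (String × Int))) :
    ∀ fuel rem, rem.length ≤ fuel → ∀ cur memo, pvInv dest memo →
      (pvGoB fuel dest cur rem memo).1 = pvVal dest cur rem ∧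
      pvInv dest (pvGoB fuel dest cur rem memo).2 := by
  intro fuel
  induction fuel using Nat.strong_induction_on with
  | _ fuel ih =>
    intro rem hlen cur memo hm
    match fuel with
    | 0 =>
      have hr : rem = [] := List.eq_nil_of_length_eq_zero (Nat.le_zero.mp hlen)
      subst hr
      exact ⟨by simp [pvGoB, pvVal, pvFindA], by simpa [pvGoB] using hm⟩
    | n + 1 =>
      by_cases hr : rem = []
      · subst hr
        exact ⟨by simp [pvGoB, pvVal, pvFindA], by simpa [pvGoB] using hm⟩
      · obtain ⟨k, hk⟩ : ∃ k, rem.length = k + 1 := by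
          have : rem.length ≠ 0 := fun h => hr (List.eq_nil_of_length_eq_zero h)
          exact ⟨rem.length - 1, by omega⟩
        obtain ⟨r0, hr0⟩ : ∃ r0 : List String,
            (if r0 = [] then none else PySem.List.pyGet? r0 (-1)) = cur ∧
            pvVal dest cur rem = pvFindA rem.length r0 rem dest := by
          cases cur with
          | none => exact ⟨[], by simp, by rw [pvVal]⟩
          | some c => exact ⟨[c], by simp [PySem.List.pyGet?_neg_one], by rw [pvVal]⟩
        have hval : pvVal dest cur rem
            = rem.foldl (pvStepA dest cur r0 rem (fun r' rem' => pvFindA k r' rem' dest)) 0 := by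
          rw [hr0.2, hk, pvFindA]
          simp only [hr, if_false, hr0.1]
        have hstep : ∀ b m x, pvInv dest m → x ∈ rem →
            ((pvStepB dest cur rem (fun c' rem' m' => pvGoB n dest c' rem' m')) (b, m) x).1
              = (pvStepA dest cur r0 rem (fun r' rem' => pvFindA k r' rem' dest)) b x ∧
            pvInv dest ((pvStepB dest cur rem (fun c' rem' m' => pvGoB n dest c' rem' m')) (b, m) x).2 := by
          intro b m x hm' hx
          have hel : (rem.erase x).length ≤ n := by have := pvEraseLen hx; omega
          have hel' : (rem.erase x).length ≤ k := by have := pvEraseLen hx; omega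
          have hgo := ih n (Nat.lt_succ_self n) (rem.erase x) hel (some x) m hm'
          have hAx : pvFindA k (r0 ++ [x]) (rem.erase x) dest = pvVal dest (some x) (rem.erase x) := by
            rw [pvA_main dest k (rem.erase x) hel' (r0 ++ [x]), List.getLast?_concat]
          simp only [pvStepA, pvStepB]
          cases cur with
          | none => exact ⟨by simp [hgo.1, hAx], hgo.2⟩
          | some c =>
            rcases hpe : pvEdge dest c x with _ | d
            · simp only [hpe]
              exact ⟨by trivial, hm'⟩
            · simp only [hpe]
              exact ⟨by simp [hgo.1, hAx], hgo.2⟩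
        have hl := pvFoldPair rem rem
          (pvStepB dest cur rem (fun c' rem' m' => pvGoB n dest c' rem' m'))
          (pvStepA dest cur r0 rem (fun r' rem' => pvFindA k r' rem' dest))
          (pvInv dest) (fun x hx => hx) hstep 0 memo hm
        rw [pvGoB]
        simp only [hr, if_false]
        cases hg : memo.get? (cur, rem) with
        | some v => exact ⟨hm cur rem v hg, hm⟩
        | none =>
          refine ⟨by rw [hl.1, ← hval], ?_⟩
          intro cur' rem' v hv
          rw [PySem.Dict.get?_insert] at hv
          by_cases hkey : (cur', rem') = (cur, rem)
          · rw [if_pos hkey] at hv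
            obtain ⟨h1, h2⟩ := Prod.mk.injEq .. ▸ hkey
            cases hv
            rw [h1, h2, hl.1, ← hval]
          · rw [if_neg hkey] at hv
            exact hl.2 cur' rem' v hv

-- ===== VERDICT (by name: the statement is the Claim_ definition above) =====
theorem find_longest_distance_spec : Claim_equal_find_longest_distance := by
  intro route rem dest _
  unfold Spec_find_longest_distance find_longest_distance_alt find_longest_distance
  have hinv : pvInv dest PySem.Dict.empty := by
    intro cur r v h
    simp [PySem.Dict.get?_empty] at h
  have hb := (pvB_main dest rem.length rem le_rfl route.getLast? PySem.Dict.empty hinv).1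
  simp only [pvCurOf route, hb, pvA_main dest rem.length rem le_rfl route]
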